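-- pv_equiv track=rewrite | github.com/cortado-tool/cortado-core | cortado_core/eventually_follows_pattern_mining/local_process_models/discovery/sequentialize_pattern.py | __concurrent_combination
-- ===== SOURCE A (Python) =====
-- from typing import List
--
-- def __concurrent_combination(elements: List[List[List[str]]]):
--     if len(elements) == 0:
--         return [[]]
--
--     if len(elements) == 1:
--         return elements[0]
--
--     permutations = []
--     for i, child_traces in enumerate(elements):
--         for trace in child_traces:
--             input = elements[:i] + elements[i + 1 :]
--             for postfix in __concurrent_combination(input):
--                 permutations.append(trace + postfix)
--
--     return permutations
-- ===== SOURCE B (Python) =====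
-- def __concurrent_combination(elements):
--     # Memoized DP over index subsets: the recursive subproblem depends only on
--     # which groups remain, so each subset (as an increasing index tuple) is
--     # solved once instead of once per path through the recursion.
--     memo = {}
--
--     def solve(idxs):
--         key = tuple(idxs)
--         if key in memo:
--             return memo[key]
--         if len(idxs) == 0:
--             res = [[]]
--         elif len(idxs) == 1:
--             res = elements[idxs[0]]
--         else:
--             res = []
--             for k in range(len(idxs)):
--                 rest = solve(idxs[:k] + idxs[k + 1:])
--                 for trace in elements[idxs[k]]:
--                     for postfix in rest:
--                         res.append(trace + postfix)
--         memo[key] = res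
--         return res
--
--     return solve(list(range(len(elements))))
-- ===== Notes on version B (the rewrite author's own statement) =====
-- stated objective: alternative
-- what changed: Replaces the naive recursion (which re-solves the same remaining-groups subproblem once per trace and per path) with top-down dynamic programming memoized per remaining index subset, with the recursive call hoisted out of the trace loop.
import Mathlib
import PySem

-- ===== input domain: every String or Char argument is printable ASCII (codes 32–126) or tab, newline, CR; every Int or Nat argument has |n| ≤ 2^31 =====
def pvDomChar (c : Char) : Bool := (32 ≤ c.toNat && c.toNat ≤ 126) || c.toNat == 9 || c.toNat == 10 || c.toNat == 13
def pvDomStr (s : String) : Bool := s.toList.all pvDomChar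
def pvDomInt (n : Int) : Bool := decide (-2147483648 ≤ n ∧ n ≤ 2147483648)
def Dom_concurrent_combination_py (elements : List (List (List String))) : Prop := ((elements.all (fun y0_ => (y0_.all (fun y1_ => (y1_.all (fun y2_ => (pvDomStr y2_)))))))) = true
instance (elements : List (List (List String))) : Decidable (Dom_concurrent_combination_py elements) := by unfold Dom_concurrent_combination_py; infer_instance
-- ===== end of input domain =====

-- B replaces A's naive recursion by top-down dynamic programming memoized per remaining
-- index subset, hoisting the subset-only recursive call out of the trace loop (objective: alternative; output size dominates, so not measurably faster).

-- ===== PORT A =====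
-- Literal port of __concurrent_combination: the outer `for i, child_traces in enumerate(elements)`
-- loop is ccLoopA; `elements[:i] + elements[i+1:]` is take i ++ drop (i+1); the recursive call
-- happens inside the per-trace loop exactly as in the Python.
mutual
def concurrent_combination_py (elements : List (List (List String))) : List (List String) :=
  if elements.length = 0 then [[]]
  else if elements.length = 1 then (PySem.List.pyGet? elements 0).getD []
  else ccLoopA elements 0 []
termination_by (elements.length, elements.length + 1)

def ccLoopA (elements : List (List (List String))) (i : Nat) (perms : List (List String)) : List (List String) :=
  if h : i < elements.length then
    ccLoopA elements (i + 1)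
      ((elements.getD i []).foldl (fun acc trace =>
        (concurrent_combination_py (elements.take i ++ elements.drop (i + 1))).foldl
          (fun acc2 pfx => acc2 ++ [trace ++ pfx]) acc) perms)
  else perms
termination_by (elements.length, elements.length - i)
decreasing_by
  · apply Prod.Lex.left; simp; omega
  · apply Prod.Lex.right; omega
end

-- ===== PORT B =====
-- Literal port of Source B: `solve` is ccSolveB (memo threaded through as state, keys are the index
-- lists, always in range so plain indexing is getD), the `for k in range(len(idxs))` loop is ccLoopB.
mutual
def ccSolveB (elements : List (List (List String)))
    (memo : PySem.Dict (List Nat) (List (List String))) (idxs : List Nat) :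
    (List (List String)) × PySem.Dict (List Nat) (List (List String)) :=
  match memo.get? idxs with
  | some v => (v, memo)
  | none =>
    let st :=
      if idxs.length = 0 then (([[]] : List (List String)), memo)
      else if idxs.length = 1 then (elements.getD (idxs.headD 0) [], memo)
      else ccLoopB elements memo idxs 0 []
    (st.1, st.2.insert idxs st.1)
termination_by (idxs.length, idxs.length + 1)

def ccLoopB (elements : List (List (List String)))
    (memo : PySem.Dict (List Nat) (List (List String))) (idxs : List Nat) (k : Nat)
    (res : List (List String)) :
    (List (List String)) × PySem.Dict (List Nat) (List (List String)) :=
  if h : k < idxs.length then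
    let p := ccSolveB elements memo (idxs.take k ++ idxs.drop (k + 1))
    ccLoopB elements p.2 idxs (k + 1)
      ((elements.getD (idxs.getD k 0) []).foldl (fun acc trace =>
        p.1.foldl (fun acc2 pfx => acc2 ++ [trace ++ pfx]) acc) res)
  else (res, memo)
termination_by (idxs.length, idxs.length - k)
decreasing_by
  · apply Prod.Lex.left; simp; omega
  · apply Prod.Lex.right; omega
end

def concurrent_combination_py_alt (elements : List (List (List String))) : List (List String) :=
  (ccSolveB elements PySem.Dict.empty (List.range elements.length)).1

-- ===== PRECONDITION & SPEC =====
def Spec_concurrent_combination_py (elements : List (List (List String))) (out : List (List String)) : Prop := out = concurrent_combination_py_alt elements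
instance (elements : List (List (List String))) (out : List (List String)) : Decidable (Spec_concurrent_combination_py elements out) := by unfold Spec_concurrent_combination_py; infer_instance

-- ===== CLAIM (what is proved, stated in full; the proofs are below) =====
def Claim_equal_concurrent_combination_py : Prop := ∀ (elements : List (List (List String))), Dom_concurrent_combination_py elements → Spec_concurrent_combination_py elements (concurrent_combination_py elements)

-- ===== LEMMAS AND PROOFS =====

-- A's value on the sub-family of groups selected by an index list.
def ccM (elements : List (List (List String))) (idxs : List Nat) : List (List String) :=
  concurrent_combination_py (idxs.map (fun i => elements.getD i []))

-- The memo invariant: every cached entry is A's value for its key.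
def ccInv (elements : List (List (List String)))
    (memo : PySem.Dict (List Nat) (List (List String))) : Prop :=
  ∀ k v, memo.get? k = some v → v = ccM elements k

theorem ccInv_insert {elements : List (List (List String))}
    {memo : PySem.Dict (List Nat) (List (List String))} {idxs : List Nat}
    {v : List (List String)} (hInv : ccInv elements memo) (hv : v = ccM elements idxs) :
    ccInv elements (memo.insert idxs v) := by
  intro k w hw
  rw [PySem.Dict.get?_insert] at hw
  split at hw
  · cases hw; subst_vars; rfl
  · exact hInv k w hw

theorem ccSolveB_ok (elements : List (List (List String))) :
    ∀ (n : Nat) (idxs : List Nat), idxs.length ≤ n →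
      ∀ memo, ccInv elements memo →
        (ccSolveB elements memo idxs).1 = ccM elements idxs ∧
        ccInv elements (ccSolveB elements memo idxs).2 := by
  intro n
  induction n with
  | zero =>
    intro idxs hlen memo hInv
    have hnil : idxs = [] := List.eq_nil_of_length_eq_zero (by omega)
    subst hnil
    rw [ccSolveB]
    cases hmem : memo.get? [] with
    | some v => exact ⟨hInv _ _ hmem, hInv⟩
    | none =>
      have hM : ccM elements [] = [[]] := by
        rw [ccM, concurrent_combination_py]; simp
      simp only [List.length_nil]
      exact ⟨hM.symm, ccInv_insert hInv hM.symm⟩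
  | succ n ih =>
    intro idxs hlen memo hInv
    rw [ccSolveB]
    cases hmem : memo.get? idxs with
    | some v => exact ⟨hInv _ _ hmem, hInv⟩
    | none =>
      by_cases h0 : idxs.length = 0
      · have hnil : idxs = [] := List.eq_nil_of_length_eq_zero h0
        subst hnil
        have hM : ccM elements [] = [[]] := by
          rw [ccM, concurrent_combination_py]; simp
        simp only [List.length_nil]
        exact ⟨hM.symm, ccInv_insert hInv hM.symm⟩
      · by_cases h1 : idxs.length = 1
        · obtain ⟨i, rfl⟩ := List.length_eq_one_iff.mp h1
          have hM : ccM elements [i] = elements.getD i [] := by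
            rw [ccM, concurrent_combination_py]
            simp [PySem.List.pyGet?, PySem.List.pyIdx?]
          simp only [List.length_cons, List.length_nil, List.headD]
          exact ⟨hM.symm, ccInv_insert hInv hM.symm⟩
        · -- length ≥ 2: the inner loop matches A's loop
          have loop_ok : ∀ (j k : Nat) (res : List (List String))
              (memo : PySem.Dict (List Nat) (List (List String))),
              idxs.length - k = j → ccInv elements memo →
              (ccLoopB elements memo idxs k res).1 =
                ccLoopA (idxs.map (fun i => elements.getD i [])) k res ∧
              ccInv elements (ccLoopB elements memo idxs k res).2 := by
            intro j
            induction j with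
            | zero =>
              intro k res memo hj hI
              have hk : ¬ k < idxs.length := by omega
              rw [ccLoopB, dif_neg hk, ccLoopA, dif_neg (by simpa using hk)]
              exact ⟨rfl, hI⟩
            | succ j ihj =>
              intro k res memo hj hI
              have hk : k < idxs.length := by omega
              have hsub : (idxs.take k ++ idxs.drop (k + 1)).length ≤ n := by
                simp; omega
              obtain ⟨hs1, hs2⟩ := ih _ hsub memo hI
              have hct : ((idxs.map fun i => elements.getD i []).getD k []) =
                  elements.getD (idxs.getD k 0) [] := by
                rw [List.getD_eq_getElem?_getD, List.getElem?_map,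
                  List.getElem?_eq_getElem hk]
                simp [List.getD_eq_getElem?_getD, List.getElem?_eq_getElem hk]
              have hinput : ((idxs.map fun i => elements.getD i []).take k ++
                  (idxs.map fun i => elements.getD i []).drop (k + 1)) =
                  ((idxs.take k ++ idxs.drop (k + 1)).map fun i => elements.getD i []) := by
                simp [List.map_take, List.map_drop]
              have hcc : concurrent_combination_py
                  ((idxs.map fun i => elements.getD i []).take k ++
                   (idxs.map fun i => elements.getD i []).drop (k + 1)) =
                  (ccSolveB elements memo (idxs.take k ++ idxs.drop (k + 1))).1 := by
                rw [hinput, hs1, ccM]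
              rw [ccLoopB, dif_pos hk, ccLoopA, dif_pos (by simpa using hk)]
              simp only [hct, hcc]
              exact ihj (k + 1) _ _ (by omega) hs2
          obtain ⟨hl1, hl2⟩ := loop_ok idxs.length 0 [] memo (by omega) hInv
          have hM : ccM elements idxs =
              ccLoopA (idxs.map (fun i => elements.getD i [])) 0 [] := by
            rw [ccM, concurrent_combination_py]
            simp only [List.length_map]
            rw [if_neg h0, if_neg h1]
          simp only [if_neg h0, if_neg h1]
          refine ⟨by rw [hl1, hM], ccInv_insert hl2 (by rw [hl1, hM])⟩

theorem map_getD_range (elements : List (List (List String))) :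
    (List.range elements.length).map (fun i => elements.getD i []) = elements := by
  apply List.ext_getElem
  · simp
  · intro i h1 h2
    simp [List.getD_eq_getElem?_getD, h2]

-- ===== VERDICT (by name: the statement is the Claim_ definition above) =====
theorem concurrent_combination_py_spec : Claim_equal_concurrent_combination_py := by
  intro elements _
  unfold Spec_concurrent_combination_py concurrent_combination_py_alt
  have hInv : ccInv elements PySem.Dict.empty := by
    intro k v hv; simp [PySem.Dict.get?_empty] at hv
  have h := (ccSolveB_ok elements elements.length (List.range elements.length)
    (by simp) PySem.Dict.empty hInv).1
  rw [h, ccM, map_getD_range]
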